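-- pv_equiv track=rewrite | github.com/irxess/IT-3105_AI_Programming_Modules_2015 | Module 3, Nonograms/main.py | find_segment_index
-- ===== SOURCE A (Python) =====
-- def find_segment_index( array, segment_nr ):
--     i = 0
--     while i < len(array):
--         if array[i] == 'black':
--             segment_nr -= 1
--             if segment_nr == 0:
--                 start = i
--                 end = i
--             i += 1
--             while i < len(array):
--                 if array[i] == 'black':
--                     if segment_nr == 0:
--                         end = i
--                     i += 1
--                 else:
--                     break
--         else:
--             i += 1
--         if segment_nr == 0:
--             return (start,end)
-- ===== SOURCE B (Python) =====
-- def find_segment_index(array, segment_nr):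
--     segments = []
--     i = 0
--     n = len(array)
--     while i < n:
--         if array[i] == 'black':
--             start = i
--             while i < n and array[i] == 'black':
--                 i += 1
--             segments.append((start, i - 1))
--         else:
--             i += 1
--     if 1 <= segment_nr <= len(segments):
--         return segments[segment_nr - 1]
--     return None
-- ===== Notes on version B (the rewrite author's own statement) =====
-- stated objective: simpler
-- what changed: Replaces A's fused count-while-scanning loop (with its counter threaded through an inner run-consuming while) by a clean decomposition: one pass collects all black runs as (start,end) pairs, then the answer is a guarded list index.
import Mathlib
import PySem

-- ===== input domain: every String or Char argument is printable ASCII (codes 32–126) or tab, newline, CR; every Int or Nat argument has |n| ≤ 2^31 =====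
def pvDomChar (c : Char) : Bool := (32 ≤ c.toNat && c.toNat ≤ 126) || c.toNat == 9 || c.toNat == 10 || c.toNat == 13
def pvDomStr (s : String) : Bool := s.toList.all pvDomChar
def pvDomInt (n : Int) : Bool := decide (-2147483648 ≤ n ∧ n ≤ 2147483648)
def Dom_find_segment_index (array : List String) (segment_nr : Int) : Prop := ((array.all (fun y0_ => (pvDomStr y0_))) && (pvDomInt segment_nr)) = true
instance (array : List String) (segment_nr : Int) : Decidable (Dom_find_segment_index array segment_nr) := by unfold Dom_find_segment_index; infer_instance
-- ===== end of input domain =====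

-- B replaces A's fused count-while-scanning loop by collect-all-runs-then-index (objective: simpler).

-- ===== PORT A =====
-- inner 'while' of A: advance i over consecutive 'black' cells, updating end when segment_nr == 0
def pvAInner (a : List String) (i : Nat) (sn : Int) (e : Int) : Nat × Int :=
  if i < a.length then
    if a.getD i "" = "black" then
      pvAInner a (i + 1) sn (if sn = 0 then (i : Int) else e)
    else (i, e)
  else (i, e)
termination_by a.length - i

theorem pvAInner_fst_ge (a : List String) (i : Nat) (sn : Int) (e : Int) :
    i ≤ (pvAInner a i sn e).1 := by
  fun_induction pvAInner a i sn e with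
  | case1 i e hlt hb ih => simp only [dite_eq_ite] at ih; omega
  | case2 => simp
  | case3 => simp

def pvAOuter (a : List String) (i : Nat) (sn st e : Int) : Option (Int × Int) :=
  if h : i < a.length then
    if a.getD i "" = "black" then
      let sn' := sn - 1
      let st' := if sn' = 0 then (i : Int) else st
      let e' := if sn' = 0 then (i : Int) else e
      let p := pvAInner a (i + 1) sn' e'
      if sn' = 0 then some (st', p.2)
      else pvAOuter a p.1 sn' st' p.2
    else
      if sn = 0 then some (st, e)
      else pvAOuter a (i + 1) sn st e
  else none
termination_by a.length - i
decreasing_by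
  · have h1 := pvAInner_fst_ge a (i + 1) (sn - 1) (if _h : sn - 1 = 0 then (i : Int) else e)
    omega
  · omega

def find_segment_index (array : List String) (segment_nr : Int) : Option (Int × Int) :=
  pvAOuter array 0 segment_nr 0 0

-- ===== PORT B =====
-- B's inner 'while i < n and array[i] == "black"'
def pvSkip (a : List String) (i : Nat) : Nat :=
  if i < a.length then
    if a.getD i "" = "black" then pvSkip a (i + 1) else i
  else i
termination_by a.length - i

theorem pvSkip_ge (a : List String) (i : Nat) : i ≤ pvSkip a i := by
  fun_induction pvSkip a i with
  | case1 i hlt hb ih => omega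
  | case2 => omega
  | case3 => omega

def pvCollect (a : List String) (i : Nat) (acc : List (Int × Int)) : List (Int × Int) :=
  if h : i < a.length then
    if a.getD i "" = "black" then
      let j := pvSkip a (i + 1)
      pvCollect a j (acc ++ [((i : Int), (j : Int) - 1)])
    else pvCollect a (i + 1) acc
  else acc
termination_by a.length - i
decreasing_by
  · have := pvSkip_ge a (i + 1); omega
  · omega

def find_segment_index_alt (array : List String) (segment_nr : Int) : Option (Int × Int) :=
  let segs := pvCollect array 0 []
  if 1 ≤ segment_nr ∧ segment_nr ≤ (segs.length : Int) then
    some (segs.getD (segment_nr - 1).toNat ((0 : Int), (0 : Int)))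
  else none

-- ===== PRECONDITION & SPEC =====
-- Pre_ excludes exactly the inputs where Python A raises UnboundLocalError:
-- segment_nr == 0 with a nonempty array whose first cell is not 'black'.
def Pre_find_segment_index (array : List String) (segment_nr : Int) : Prop :=
  segment_nr = 0 → (array = [] ∨ array.getD 0 "" = "black")
instance (array : List String) (segment_nr : Int) : Decidable (Pre_find_segment_index array segment_nr) := by unfold Pre_find_segment_index; infer_instance

def pvWitness_find_segment_index : List String × Int := (["black", "white", "black"], 2)

def Spec_find_segment_index (array : List String) (segment_nr : Int) (out : Option (Int × Int)) : Prop := out = find_segment_index_alt array segment_nr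
instance (array : List String) (segment_nr : Int) (out : Option (Int × Int)) : Decidable (Spec_find_segment_index array segment_nr out) := by unfold Spec_find_segment_index; infer_instance

-- ===== CLAIM (what is proved, stated in full; the proofs are below) =====
def Claim_equal_find_segment_index : Prop := ∀ (array : List String) (segment_nr : Int), Dom_find_segment_index array segment_nr → Pre_find_segment_index array segment_nr → Spec_find_segment_index array segment_nr (find_segment_index array segment_nr)

-- ===== LEMMAS AND PROOFS =====

-- selecting the segment_nr-th element of a segment list, 1-based (B's final guarded index)
def pvNth (segs : List (Int × Int)) (sn : Int) : Option (Int × Int) :=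
  if 1 ≤ sn ∧ sn ≤ (segs.length : Int) then some (segs.getD (sn - 1).toNat ((0 : Int), (0 : Int))) else none

theorem alt_eq_nth (a : List String) (sn : Int) :
    find_segment_index_alt a sn = pvNth (pvCollect a 0 []) sn := rfl

theorem pvNth_nil (sn : Int) : pvNth [] sn = none := by
  unfold pvNth; simp; omega

theorem pvNth_nonpos (segs : List (Int × Int)) (sn : Int) (h : sn ≤ 0) :
    pvNth segs sn = none := by
  unfold pvNth; rw [if_neg]; omega

theorem pvNth_cons_one (p : Int × Int) (rest : List (Int × Int)) :
    pvNth (p :: rest) 1 = some p := by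
  unfold pvNth
  rw [if_pos (by refine ⟨le_refl 1, ?_⟩; simp only [List.length_cons]; push_cast; omega)]
  simp

theorem pvNth_cons (p : Int × Int) (rest : List (Int × Int)) (sn : Int) (h : sn ≠ 1) :
    pvNth (p :: rest) sn = pvNth rest (sn - 1) := by
  unfold pvNth
  by_cases h1 : 1 ≤ sn - 1 ∧ sn - 1 ≤ (rest.length : Int)
  · rw [if_pos (by simp; omega), if_pos h1]
    have h2 : (sn - 1).toNat = (sn - 1 - 1).toNat + 1 := by omega
    rw [h2, List.getD_cons_succ]
  · rw [if_neg (by simp; simp at h1; omega), if_neg h1]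

theorem pvCollect_accAux (a : List String) : ∀ (k i : Nat) (acc : List (Int × Int)),
    a.length - i ≤ k → pvCollect a i acc = acc ++ pvCollect a i [] := by
  intro k
  induction k with
  | zero =>
    intro i acc hk
    have h : ¬ i < a.length := by omega
    rw [pvCollect, dif_neg h, pvCollect, dif_neg h]
    simp
  | succ k ih =>
    intro i acc hk
    by_cases hlt : i < a.length
    · by_cases hb : a.getD i "" = "black"
      · have hge := pvSkip_ge a (i + 1)
        have h1 : pvCollect a i acc
            = pvCollect a (pvSkip a (i + 1)) (acc ++ [((i : Int), ((pvSkip a (i + 1) : Nat) : Int) - 1)]) := by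
          rw [pvCollect, dif_pos hlt, if_pos hb]
        have h2 : pvCollect a i []
            = pvCollect a (pvSkip a (i + 1)) ([] ++ [((i : Int), ((pvSkip a (i + 1) : Nat) : Int) - 1)]) := by
          rw [pvCollect, dif_pos hlt, if_pos hb]
        rw [h1, h2, ih _ _ (by omega), ih (pvSkip a (i + 1)) ([] ++ [((i : Int), ((pvSkip a (i + 1) : Nat) : Int) - 1)]) (by omega)]
        simp
      · have h1 : pvCollect a i acc = pvCollect a (i + 1) acc := by
          rw [pvCollect, dif_pos hlt, if_neg hb]
        have h2 : pvCollect a i [] = pvCollect a (i + 1) [] := by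
          rw [pvCollect, dif_pos hlt, if_neg hb]
        rw [h1, h2, ih _ _ (by omega)]
    · rw [pvCollect, dif_neg hlt, pvCollect, dif_neg hlt]
      simp


theorem pvCollect_acc (a : List String) (i : Nat) (acc : List (Int × Int)) :
    pvCollect a i acc = acc ++ pvCollect a i [] :=
  pvCollect_accAux a (a.length - i) i acc le_rfl

theorem pvAInner_spec (a : List String) (i : Nat) (sn e : Int) :
    pvAInner a i sn e =
      (pvSkip a i,
       if sn = 0 then (if pvSkip a i = i then e else (pvSkip a i : Int) - 1) else e) := by
  fun_induction pvAInner a i sn e with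
  | case1 i e hlt hb ih =>
    simp only [dite_eq_ite] at ih
    show pvAInner a (i + 1) sn (if sn = 0 then (i : Int) else e) = _
    rw [ih]
    rw [show pvSkip a i = pvSkip a (i + 1) by rw [pvSkip, if_pos hlt, if_pos hb]]
    have hge := pvSkip_ge a (i + 1)
    refine Prod.ext rfl ?_
    by_cases hsn : sn = 0
    · subst hsn
      have hne : ¬ pvSkip a (i + 1) = i := by omega
      by_cases hj : pvSkip a (i + 1) = i + 1
      · simp [hj]
      · simp [hj, hne]
    · simp [hsn]
  | case2 i e hlt hb =>
    show ((i, e) : Nat × Int) = _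
    rw [show pvSkip a i = i by rw [pvSkip, if_pos hlt, if_neg hb]]
    simp
  | case3 i e h =>
    show ((i, e) : Nat × Int) = _
    rw [show pvSkip a i = i by rw [pvSkip, if_neg h]]
    simp
theorem pvMain (a : List String) (i : Nat) (sn st e : Int) (hsn : sn ≠ 0) :
    pvAOuter a i sn st e = pvNth (pvCollect a i []) sn := by
  fun_induction pvAOuter a i sn st e with
  | case1 i sn st e hlt hb sn' st' e' p hz =>
    -- sn' = sn - 1 = 0, i.e. sn = 1: A returns (i, last index of the run)
    rw [pvCollect, dif_pos hlt, if_pos hb, pvCollect_acc]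
    simp only [List.nil_append, List.singleton_append]
    simp only [sn'] at hz
    rw [show sn = 1 by omega, pvNth_cons_one]
    simp only [p, st', e', sn', pvAInner_spec, dif_pos hz]
    have hge := pvSkip_ge a (i + 1)
    by_cases hj : pvSkip a (i + 1) = i + 1
    · simp only [hz, hj]
      refine congrArg some (Prod.ext rfl ?_)
      simp
    · simp [hz, hj]
  | case2 i sn st e hlt hb sn' st' e' p hz ih =>
    rw [pvCollect, dif_pos hlt, if_pos hb, pvCollect_acc]
    simp only [List.nil_append, List.singleton_append]
    have hsn1 : sn ≠ 1 := by simp only [sn'] at hz; omega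
    rw [pvNth_cons _ _ _ hsn1, ih hz]
    have hp1 : p.1 = pvSkip a (i + 1) := by
      show (pvAInner a (i + 1) sn' e').1 = _
      rw [pvAInner_spec]
    rw [hp1]
  | case3 i st e hlt hb => exact absurd rfl hsn
  | case4 i sn st e hlt hb hz ih =>
    rw [ih hsn]
    conv_rhs => rw [pvCollect, dif_pos hlt, if_neg hb]
  | case5 i sn st e h =>
    rw [pvCollect, dif_neg h, pvNth_nil]

-- ===== VERDICT (by name: the statement is the Claim_ definition above) =====
theorem find_segment_index_spec : Claim_equal_find_segment_index := by
  unfold Claim_equal_find_segment_index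
  intro a sn _dom pre
  unfold Spec_find_segment_index
  rw [alt_eq_nth]
  show pvAOuter a 0 sn 0 0 = _
  by_cases hsn : sn = 0
  · subst hsn
    rcases pre rfl with hnil | hb
    · subst hnil
      rw [pvAOuter, dif_neg (by simp)]
      rw [pvCollect, dif_neg (by simp), pvNth_nil]
    · rw [pvNth_nonpos _ _ (by omega)]
      have hlen : 0 < a.length := by
        cases a with
        | nil => simp at hb
        | cons x xs => simp
      rw [pvAOuter, dif_pos hlen, if_pos hb, if_neg (by omega)]
      rw [pvMain a _ _ _ _ (by omega), pvNth_nonpos _ _ (by omega)]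
  · exact pvMain a 0 sn 0 0 hsn
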